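-- pv_equiv track=rewrite | github.com/caio-bernardo/Blabinha-API | src/app/blabinha/Blab.py | get_highest_past_turn
-- ===== SOURCE A (Python) =====
-- def get_highest_past_turn(result: list) -> int:
--     highest = 0
--     for i in result:
--         if i[2] > highest:
--             highest = i[2]
--     if highest >= 216:
--         return 4
--     if highest >= 215:
--         return 3
--     if highest >= 213:
--         return 2
--     if highest >= 211:
--         return 1
--     return 0
-- ===== SOURCE B (Python) =====
-- def get_highest_past_turn(result: list) -> int:
--     # Map each row's third element to its tier (0..4) by summing boolean
--     # comparisons, and keep the running maximum tier; stop early at tier 4.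
--     # Tiering is monotone, so the max tier equals the tier of the max value.
--     best = 0
--     for row in result:
--         v = row[2]
--         tier = (v >= 211) + (v >= 213) + (v >= 215) + (v >= 216)
--         if tier > best:
--             best = tier
--             if best == 4:
--                 break
--     return best
-- ===== Notes on version B (the rewrite author's own statement) =====
-- stated objective: alternative
-- what changed: Instead of computing the global max of the third elements and then classifying it through the descending if-cascade, B classifies each element into a tier (a sum of boolean comparisons) and keeps the running maximum tier, exiting early once the top tier 4 is reached; correctness follows from monotonicity of the tier map.
import Mathlib
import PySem

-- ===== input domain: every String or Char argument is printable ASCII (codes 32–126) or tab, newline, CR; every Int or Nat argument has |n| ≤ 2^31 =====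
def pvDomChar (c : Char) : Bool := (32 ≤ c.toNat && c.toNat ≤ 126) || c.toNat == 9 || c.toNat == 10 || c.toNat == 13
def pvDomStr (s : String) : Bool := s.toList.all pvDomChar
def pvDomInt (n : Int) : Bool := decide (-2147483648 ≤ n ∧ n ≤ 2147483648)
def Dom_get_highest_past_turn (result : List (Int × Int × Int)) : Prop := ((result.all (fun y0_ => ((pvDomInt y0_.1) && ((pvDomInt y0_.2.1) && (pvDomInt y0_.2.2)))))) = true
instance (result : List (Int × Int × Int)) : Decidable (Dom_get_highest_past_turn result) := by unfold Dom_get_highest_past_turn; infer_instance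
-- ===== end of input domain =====

-- B classifies each element into a tier (sum of boolean comparisons) and keeps the
-- running maximum tier with an early exit at 4, instead of A's global max + if-cascade
-- (alternative decomposition; same O(n) cost).

-- ===== PORT A =====
def get_highest_past_turn (result : List (Int × Int × Int)) : Int :=
  let highest := result.foldl (fun highest i => if i.2.2 > highest then i.2.2 else highest) 0
  if highest ≥ 216 then 4
  else if highest ≥ 215 then 3
  else if highest ≥ 213 then 2
  else if highest ≥ 211 then 1
  else 0

-- ===== PORT B =====
-- tier of one value: Python's sum of four booleans
def pvTier (v : Int) : Int :=
  (if v ≥ 211 then 1 else 0) + (if v ≥ 213 then 1 else 0)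
    + (if v ≥ 215 then 1 else 0) + (if v ≥ 216 then 1 else 0)

-- B's loop: running max of tiers, early exit when the top tier 4 is hit
def pvBestLoop : List (Int × Int × Int) → Int → Int
  | [], best => best
  | row :: rest, best =>
      let tier := pvTier row.2.2
      if tier > best then
        if tier = 4 then 4 else pvBestLoop rest tier
      else pvBestLoop rest best

def get_highest_past_turn_alt (result : List (Int × Int × Int)) : Int :=
  pvBestLoop result 0

-- ===== PRECONDITION & SPEC =====
def Spec_get_highest_past_turn (result : List (Int × Int × Int)) (out : Int) : Prop := out = get_highest_past_turn_alt result
instance (result : List (Int × Int × Int)) (out : Int) : Decidable (Spec_get_highest_past_turn result out) := by unfold Spec_get_highest_past_turn; infer_instance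

-- ===== CLAIM (what is proved, stated in full; the proofs are below) =====
def Claim_equal_get_highest_past_turn : Prop := ∀ (result : List (Int × Int × Int)), Dom_get_highest_past_turn result → Spec_get_highest_past_turn result (get_highest_past_turn result)

-- ===== LEMMAS AND PROOFS =====

theorem pvTier_le4 (v : Int) : pvTier v ≤ 4 := by
  simp only [pvTier]; split_ifs <;> omega

theorem pvTier_mono {a b : Int} (h : a ≤ b) : pvTier a ≤ pvTier b := by
  simp only [pvTier]; split_ifs <;> omega

theorem pvTier_max (a b : Int) : pvTier (max a b) = max (pvTier a) (pvTier b) := by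
  rcases le_total a b with h | h
  · rw [max_eq_right h, max_eq_right (pvTier_mono h)]
  · rw [max_eq_left h, max_eq_left (pvTier_mono h)]

-- A's conditional update is a running max
theorem pv_foldl_max (l : List (Int × Int × Int)) (a : Int) :
    l.foldl (fun highest i => if i.2.2 > highest then i.2.2 else highest) a
      = l.foldl (fun h i => max h i.2.2) a := by
  induction l generalizing a with
  | nil => rfl
  | cons x t ih =>
      simp only [List.foldl]
      rw [ih]
      congr 1
      by_cases h : x.2.2 > a <;> simp [h, max_def] <;> omega

-- tier commutes with the running max (monotone homomorphism pushed through the fold)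
theorem pv_tier_foldl (l : List (Int × Int × Int)) (h : Int) :
    pvTier (l.foldl (fun h i => max h i.2.2) h)
      = l.foldl (fun acc i => max acc (pvTier i.2.2)) (pvTier h) := by
  induction l generalizing h with
  | nil => rfl
  | cons x t ih => simp only [List.foldl]; rw [ih, pvTier_max]

-- once the accumulator is 4, the max-of-tiers fold stays 4
theorem pv_foldl_top (l : List (Int × Int × Int)) :
    l.foldl (fun acc i => max acc (pvTier i.2.2)) 4 = 4 := by
  induction l with
  | nil => rfl
  | cons x t ih =>
      simp only [List.foldl]
      rw [max_eq_left (pvTier_le4 _)]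
      exact ih

-- B's early-exit loop computes the max-of-tiers fold
theorem pv_bestLoop_eq (l : List (Int × Int × Int)) (b : Int) :
    pvBestLoop l b = l.foldl (fun acc i => max acc (pvTier i.2.2)) b := by
  induction l generalizing b with
  | nil => rfl
  | cons x t ih =>
      simp only [pvBestLoop, List.foldl]
      by_cases hgt : pvTier x.2.2 > b
      · rw [max_eq_right (le_of_lt hgt)]
        by_cases h4 : pvTier x.2.2 = 4
        · show (if pvTier x.2.2 > b then if pvTier x.2.2 = 4 then 4 else pvBestLoop t (pvTier x.2.2) else pvBestLoop t b) = _
          rw [if_pos hgt, if_pos h4, h4, pv_foldl_top]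
        · simp [hgt, h4, ih]
      · rw [max_eq_left (not_lt.mp hgt)]
        simp [hgt, ih]

-- A's if-cascade is exactly the tier of its argument
theorem pv_cascade_eq_tier (h : Int) :
    (if h ≥ 216 then (4:Int) else if h ≥ 215 then 3 else if h ≥ 213 then 2
      else if h ≥ 211 then 1 else 0) = pvTier h := by
  simp only [pvTier]; split_ifs <;> omega

-- ===== VERDICT (by name: the statement is the Claim_ definition above) =====
theorem get_highest_past_turn_spec : Claim_equal_get_highest_past_turn := by
  intro result _
  show get_highest_past_turn result = get_highest_past_turn_alt result
  simp only [get_highest_past_turn, get_highest_past_turn_alt]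
  rw [pv_foldl_max, pv_cascade_eq_tier, pv_tier_foldl, pv_bestLoop_eq]
  rfl
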